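-- pv_equiv track=rewrite | github.com/SStakafumi/my-atcoder | DP/部分和問題DP.py | find_max_dp
-- ===== SOURCE A (Python) =====
-- def find_max_dp(num_list, limit):
--     list_len = len(num_list)
--     dp_table = [[0 for _ in range(limit + 1)] for _ in range(list_len)]
--
--     # 1番目のカード(これいるか？)
--     """ for j in range(limit + 1):
--         if num_list[0] <= j:
--             dp_table[0][j] = list[0]  # 1番目のカードを追加 """
--
--     # 2番目以降のカード
--     for i in range(list_len):
--         for j in range(limit + 1):
--             tmp_not_choice = dp_table[i-1][j]
--             if num_list[i] > j:  # コストオーバーのとき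
--                 dp_table[i][j] = tmp_not_choice  # 選ばない
--             else:  # まだコストが余ってるとき
--                 tmp_choice = dp_table[i-1][j - num_list[i]] + num_list[i]
--                 dp_table[i][j] = max(tmp_choice, tmp_not_choice)
--
--     return dp_table[list_len - 1][limit]
-- ===== SOURCE B (Python) =====
-- def find_max_dp(num_list, limit):
--     # Track the set of achievable subset sums (capped at limit) instead of a DP table of maxima.
--     sums = {0}
--     for x in num_list:
--         sums |= {s + x for s in sums if s + x <= limit}
--     return max(sums)
-- ===== Notes on version B (the rewrite author's own statement) =====
-- stated objective: alternative
-- what changed: Replaces the 2D max-value DP table with a single set of achievable subset sums (capped at limit), folding each item by set union and returning the set's maximum.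
-- intended difference: On single-item lists [x] with 0 < x and 2*x <= limit, A's row dp_table[i-1] aliases the row being written and A returns the unbounded-use value (limit//x)*x, while B returns x, the correct maximum subset sum of one card. — e.g. on find_max_dp([1], 2): A returns 2, B returns 1
import Mathlib
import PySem

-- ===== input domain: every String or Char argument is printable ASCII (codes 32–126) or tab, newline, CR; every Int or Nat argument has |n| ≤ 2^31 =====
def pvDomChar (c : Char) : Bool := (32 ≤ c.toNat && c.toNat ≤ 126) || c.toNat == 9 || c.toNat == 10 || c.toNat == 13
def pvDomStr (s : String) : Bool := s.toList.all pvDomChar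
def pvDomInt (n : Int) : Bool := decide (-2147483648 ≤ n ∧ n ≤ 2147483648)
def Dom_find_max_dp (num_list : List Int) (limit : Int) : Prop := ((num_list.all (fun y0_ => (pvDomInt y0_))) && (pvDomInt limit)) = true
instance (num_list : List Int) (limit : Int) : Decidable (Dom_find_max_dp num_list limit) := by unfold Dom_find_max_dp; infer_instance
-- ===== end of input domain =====

-- B replaces A's 2D max-value DP table by a fold maintaining the set of achievable subset sums
-- capped at limit; on single-item lists A's self-aliasing row makes it return the unbounded-use
-- value — stated as the intended difference D_ below.


-- ===== PORT A =====
-- dp_table[i][j] read with Python semantics (negative index wraps; none = IndexError)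
def pvRead (tb : List (List Int)) (i j : Int) : Option Int :=
  (PySem.List.pyGet? tb i).bind (fun r => PySem.List.pyGet? r j)

-- dp_table[i][j] = v ; A only writes with i from range(list_len) and j from range(limit+1),
-- both nonnegative and in range, where this is exactly Python's in-place element assignment
def pvWrite (tb : List (List Int)) (i j : Int) (v : Int) : List (List Int) :=
  tb.set i.toNat ((tb.getD i.toNat []).set j.toNat v)

-- body of A's inner loop for a given i and j (state = the table; none once A has raised)
def pvStep (num_list : List Int) (i : Int) (tb? : Option (List (List Int))) (j : Int) :
    Option (List (List Int)) :=
  tb?.bind fun tb =>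
    (pvRead tb (i - 1) j).bind fun tmp_not_choice =>
      (PySem.List.pyGet? num_list i).bind fun ni =>
        if ni > j then
          some (pvWrite tb i j tmp_not_choice)
        else
          (pvRead tb (i - 1) (j - ni)).bind fun prev =>
            some (pvWrite tb i j (max (prev + ni) tmp_not_choice))

def find_max_dp (num_list : List Int) (limit : Int) : Int :=
  let list_len : Int := PySem.List.len num_list
  let table0 : List (List Int) :=
    List.replicate num_list.length (List.replicate (limit + 1).toNat 0)
  let final : Option (List (List Int)) :=
    (PySem.List.pyRange 0 list_len 1).foldl
      (fun tb? i => (PySem.List.pyRange 0 (limit + 1) 1).foldl (pvStep num_list i) tb?) table0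
  (final.bind fun tb => pvRead tb (list_len - 1) limit).getD 0

-- ===== PORT B =====
def find_max_dp_alt (num_list : List Int) (limit : Int) : Int :=
  let sums : PySem.Set Int :=
    num_list.foldl
      (fun s x =>
        PySem.Set.union s
          (PySem.Set.ofList ((s.filter (fun v => v + x ≤ limit)).map (fun v => v + x))))
      (PySem.Set.ofList [0])
  -- max(sums): 0 is always in sums, so the set is never empty and the default is unreachable
  (PySem.List.max? sums (fun v => v)).getD 0

-- ===== PRECONDITION & SPEC =====
-- Pre_ excludes exactly the inputs where A raises IndexError: empty list, negative limit,
-- or a negative item (each makes a row/column access go out of range).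
def Pre_find_max_dp (num_list : List Int) (limit : Int) : Prop :=
  num_list ≠ [] ∧ 0 ≤ limit ∧ ∀ x ∈ num_list, 0 ≤ x
instance (num_list : List Int) (limit : Int) : Decidable (Pre_find_max_dp num_list limit) := by
  unfold Pre_find_max_dp; infer_instance
def pvWitness_find_max_dp : List Int × Int := ([2, 3], 4)

-- On single-item lists [x] with 0 < x and 2*x ≤ limit, A's row dp_table[i-1] aliases the row
-- being written and A returns the unbounded-use value (limit//x)*x, while B returns x, the
-- correct maximum subset sum of one card.
def D_find_max_dp (num_list : List Int) (limit : Int) : Prop :=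
  num_list.length = 1 ∧ 0 < num_list.headI ∧ 2 * num_list.headI ≤ limit
instance (num_list : List Int) (limit : Int) : Decidable (D_find_max_dp num_list limit) := by
  unfold D_find_max_dp; infer_instance

def Spec_find_max_dp (num_list : List Int) (limit : Int) (out : Int) : Prop :=
  ¬ D_find_max_dp num_list limit → out = find_max_dp_alt num_list limit
instance (num_list : List Int) (limit : Int) (out : Int) :
    Decidable (Spec_find_max_dp num_list limit out) := by
  unfold Spec_find_max_dp; infer_instance

def pvDiffWitness_find_max_dp : List Int × Int := ([1], 2)
def pvDiffWitnessOut_find_max_dp : Int × Int := (2, 1)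

-- ===== CLAIM (what is proved, stated in full; the proofs are below) =====
def Claim_unchanged_find_max_dp : Prop := ∀ (num_list : List Int) (limit : Int), Dom_find_max_dp num_list limit → Pre_find_max_dp num_list limit → Spec_find_max_dp num_list limit (find_max_dp num_list limit)
def Claim_changed_find_max_dp : Prop := Dom_find_max_dp (pvDiffWitness_find_max_dp.1) (pvDiffWitness_find_max_dp.2) ∧ Pre_find_max_dp (pvDiffWitness_find_max_dp.1) (pvDiffWitness_find_max_dp.2) ∧ D_find_max_dp (pvDiffWitness_find_max_dp.1) (pvDiffWitness_find_max_dp.2) ∧ find_max_dp (pvDiffWitness_find_max_dp.1) (pvDiffWitness_find_max_dp.2) = pvDiffWitnessOut_find_max_dp.1 ∧ find_max_dp_alt (pvDiffWitness_find_max_dp.1) (pvDiffWitness_find_max_dp.2) = pvDiffWitnessOut_find_max_dp.2 ∧ pvDiffWitnessOut_find_max_dp.1 ≠ pvDiffWitnessOut_find_max_dp.2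
def Claim_exact_find_max_dp : Prop := ∀ (num_list : List Int) (limit : Int), Dom_find_max_dp num_list limit → Pre_find_max_dp num_list limit → D_find_max_dp num_list limit → find_max_dp num_list limit ≠ find_max_dp_alt num_list limit

-- ===== LEMMAS AND PROOFS =====

-- all subset sums of a list (with multiplicity; 0 = empty subset)
def subsums : List Int → List Int
  | [] => [0]
  | x :: xs => subsums xs ++ (subsums xs).map (fun v => v + x)

-- running maximum of the elements ≤ j, starting from 0
def bmax (j : Int) (l : List Int) : Int :=
  l.foldl (fun m v => if v ≤ j ∧ m < v then v else m) 0

-- the mathematical answer: the largest subset sum of p not exceeding j (0 if none)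
def maxsub (p : List Int) (j : Int) : Int := bmax j (subsums p)

-- value of A's self-aliasing single-row loop: unbounded reuse of the single item x
def unb (x j : Int) : Int :=
  if _h : 0 < x ∧ x ≤ j then unb x (j - x) + x else 0
termination_by j.toNat
decreasing_by omega

theorem bmax_init_le (j : Int) (l : List Int) (a : Int) :
    a ≤ l.foldl (fun m v => if v ≤ j ∧ m < v then v else m) a := by
  induction l generalizing a with
  | nil => simp
  | cons x t ih =>
    simp only [List.foldl_cons]
    refine le_trans ?_ (ih _)
    split <;> omega

theorem bmax_ub (j : Int) (l : List Int) (a v : Int) (hv : v ∈ l) (hj : v ≤ j) :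
    v ≤ l.foldl (fun m v => if v ≤ j ∧ m < v then v else m) a := by
  induction l generalizing a with
  | nil => simp at hv
  | cons x t ih =>
    simp only [List.foldl_cons]
    rcases List.mem_cons.mp hv with h | h
    · subst h
      refine le_trans ?_ (bmax_init_le j t _)
      split <;> omega
    · exact ih _ h

theorem bmax_cases (j : Int) (l : List Int) (a : Int) :
    l.foldl (fun m v => if v ≤ j ∧ m < v then v else m) a = a ∨
      (l.foldl (fun m v => if v ≤ j ∧ m < v then v else m) a ∈ l ∧
        l.foldl (fun m v => if v ≤ j ∧ m < v then v else m) a ≤ j) := by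
  induction l generalizing a with
  | nil => left; simp
  | cons x t ih =>
    simp only [List.foldl_cons]
    rcases ih (if x ≤ j ∧ a < x then x else a) with h | h
    · rw [h]
      by_cases hc : x ≤ j ∧ a < x
      · right; rw [if_pos hc]; exact ⟨List.mem_cons_self, hc.1⟩
      · left; rw [if_neg hc]
    · right; exact ⟨List.mem_cons_of_mem _ h.1, h.2⟩

theorem zero_mem_subsums (p : List Int) : (0 : Int) ∈ subsums p := by
  induction p with
  | nil => simp [subsums]
  | cons x t ih => simp only [subsums, List.mem_append]; exact Or.inl ih

theorem subsums_nonneg (p : List Int) (hp : ∀ x ∈ p, 0 ≤ x) :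
    ∀ v ∈ subsums p, 0 ≤ v := by
  induction p with
  | nil => intro v hv; simp [subsums] at hv; omega
  | cons x t ih =>
    intro v hv
    have hx : 0 ≤ x := hp x (List.mem_cons_self)
    have ht : ∀ y ∈ t, 0 ≤ y := fun y hy => hp y (List.mem_cons_of_mem _ hy)
    simp only [subsums, List.mem_append, List.mem_map] at hv
    rcases hv with h | ⟨w, hw, rfl⟩
    · exact ih ht v h
    · have := ih ht w hw; omega

theorem maxsub_le (p : List Int) (j : Int) (hj : 0 ≤ j) : maxsub p j ≤ j := by
  rcases bmax_cases j (subsums p) 0 with h | h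
  · unfold maxsub bmax; omega
  · exact h.2

theorem maxsub_mem (p : List Int) (j : Int) : maxsub p j ∈ subsums p := by
  rcases bmax_cases j (subsums p) 0 with h | h
  · unfold maxsub bmax; rw [h]; exact zero_mem_subsums p
  · exact h.1

theorem maxsub_ub (p : List Int) (j v : Int) (hv : v ∈ subsums p) (hj : v ≤ j) :
    v ≤ maxsub p j :=
  bmax_ub j (subsums p) 0 v hv hj

theorem mem_subsums_append (p : List Int) (x v : Int) :
    v ∈ subsums (p ++ [x]) ↔ v ∈ subsums p ∨ ∃ w ∈ subsums p, v = w + x := by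
  induction p generalizing v with
  | nil => simp [subsums]
  | cons y t ih =>
    simp only [List.cons_append, subsums, List.mem_append, List.mem_map]
    constructor
    · rintro (h | ⟨u, hu, rfl⟩)
      · rcases (ih _).mp h with h' | ⟨w, hw, rfl⟩
        · exact Or.inl (Or.inl h')
        · exact Or.inr ⟨w, Or.inl hw, rfl⟩
      · rcases (ih _).mp hu with h' | ⟨w, hw, rfl⟩
        · exact Or.inl (Or.inr ⟨u, h', rfl⟩)
        · exact Or.inr ⟨w + y, Or.inr ⟨w, hw, rfl⟩, by ring⟩
    · rintro ((h | ⟨u, hu, rfl⟩) | ⟨w, (hw | ⟨u, hu, rfl⟩), rfl⟩)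
      · exact Or.inl ((ih _).mpr (Or.inl h))
      · exact Or.inr ⟨u, (ih _).mpr (Or.inl hu), rfl⟩
      · exact Or.inl ((ih _).mpr (Or.inr ⟨w, hw, rfl⟩))
      · exact Or.inr ⟨u + x, (ih _).mpr (Or.inr ⟨u, hu, rfl⟩), by ring⟩

theorem maxsub_nil (j : Int) : maxsub [] j = 0 := by
  unfold maxsub subsums bmax
  simp

theorem maxsub_recurrence (p : List Int) (x j : Int) (_hx : 0 ≤ x)
    (hp : ∀ y ∈ p, 0 ≤ y) (hj : 0 ≤ j) :
    maxsub (p ++ [x]) j =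
      if x > j then maxsub p j else max (maxsub p (j - x) + x) (maxsub p j) := by
  have hmemL : maxsub (p ++ [x]) j ∈ subsums (p ++ [x]) := maxsub_mem _ _
  have hleL : maxsub (p ++ [x]) j ≤ j := maxsub_le _ _ hj
  apply le_antisymm
  · rcases (mem_subsums_append p x _).mp hmemL with h | ⟨w, hw, heq⟩
    · have h1 : maxsub (p ++ [x]) j ≤ maxsub p j := maxsub_ub p j _ h hleL
      split <;> omega
    · have hw0 : 0 ≤ w := subsums_nonneg p hp w hw
      by_cases hc : x > j
      · omega
      · rw [if_neg hc]
        have hwle : w ≤ j - x := by omega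
        have := maxsub_ub p (j - x) w hw hwle
        omega
  · by_cases hc : x > j
    · rw [if_pos hc]
      exact maxsub_ub (p ++ [x]) j _ ((mem_subsums_append p x _).mpr (Or.inl (maxsub_mem p j)))
        (maxsub_le p j hj)
    · rw [if_neg hc]
      have h1 : maxsub p (j - x) + x ≤ maxsub (p ++ [x]) j := by
        refine maxsub_ub (p ++ [x]) j _
          ((mem_subsums_append p x _).mpr (Or.inr ⟨maxsub p (j - x), maxsub_mem p (j - x), rfl⟩))
          ?_
        have := maxsub_le p (j - x) (by omega)
        omega
      have h2 : maxsub p j ≤ maxsub (p ++ [x]) j :=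
        maxsub_ub (p ++ [x]) j _ ((mem_subsums_append p x _).mpr (Or.inl (maxsub_mem p j)))
          (maxsub_le p j hj)
      omega

theorem maxsub_single (x j : Int) (hx : 0 ≤ x) (hj : 0 ≤ j) :
    maxsub [x] j = if x > j then 0 else x := by
  have := maxsub_recurrence [] x j hx (by simp) hj
  simp only [List.nil_append, maxsub_nil] at this
  rw [this]
  split
  · rfl
  · omega

theorem unb_nonneg (x j : Int) : 0 ≤ unb x j := by
  unfold unb
  split
  · have := unb_nonneg x (j - x); omega
  · omega
termination_by j.toNat
decreasing_by omega

-- ---------- B port = maxsub ----------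

theorem alt_sums_mem (limit : Int) (hl : 0 ≤ limit) (p : List Int) (hp : ∀ x ∈ p, 0 ≤ x) :
    ∀ v, (v ∈ p.foldl
      (fun s x =>
        PySem.Set.union s
          (PySem.Set.ofList ((s.filter (fun v => v + x ≤ limit)).map (fun v => v + x))))
      (PySem.Set.ofList [0])) ↔ (v ∈ subsums p ∧ v ≤ limit) := by
  induction p using List.reverseRecOn with
  | nil =>
    intro v
    simp only [List.foldl_nil, subsums]
    constructor
    · intro hv
      have h := (PySem.Set.mem_ofList _ _).mp hv
      simp at h; subst h; simp; omega
    · intro hv; simp at hv; rw [hv.1]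
      exact (PySem.Set.mem_ofList _ _).mpr (by simp)
  | append_singleton p x ih =>
    intro v
    have hx : 0 ≤ x := hp x (by simp)
    have hp' : ∀ y ∈ p, 0 ≤ y := fun y hy => hp y (by simp [hy])
    rw [List.foldl_append]
    simp only [List.foldl_cons, List.foldl_nil]
    rw [PySem.Set.mem_union _ _ _, PySem.Set.mem_ofList _ _]
    simp only [List.mem_map, List.mem_filter]
    constructor
    · rintro (h | ⟨w, ⟨hw, hwle⟩, rfl⟩)
      · have := (ih hp' v).mp h
        exact ⟨(mem_subsums_append p x v).mpr (Or.inl this.1), this.2⟩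
      · have := (ih hp' w).mp hw
        refine ⟨(mem_subsums_append p x _).mpr (Or.inr ⟨w, this.1, rfl⟩), by simpa using hwle⟩
    · rintro ⟨hmem, hle⟩
      rcases (mem_subsums_append p x v).mp hmem with h | ⟨w, hw, rfl⟩
      · exact Or.inl ((ih hp' v).mpr ⟨h, hle⟩)
      · have hw0 : 0 ≤ w := subsums_nonneg p hp' w hw
        refine Or.inr ⟨w, ⟨(ih hp' w).mpr ⟨hw, by omega⟩, by simpa using hle⟩, rfl⟩

theorem alt_eq_maxsub (num_list : List Int) (limit : Int) (hl : 0 ≤ limit)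
    (hp : ∀ x ∈ num_list, 0 ≤ x) :
    find_max_dp_alt num_list limit = maxsub num_list limit := by
  set L := num_list.foldl
      (fun s x =>
        PySem.Set.union s
          (PySem.Set.ofList ((s.filter (fun v => v + x ≤ limit)).map (fun v => v + x))))
      (PySem.Set.ofList [0]) with hL
  have hdef : find_max_dp_alt num_list limit = (PySem.List.max? L (fun v => v)).getD 0 := rfl
  rw [hdef]
  have hmem := alt_sums_mem limit hl num_list hp
  have h0 : (0 : Int) ∈ L := (hmem 0).mpr ⟨zero_mem_subsums _, hl⟩
  have hne : L ≠ [] := fun h => by rw [h] at h0; simp at h0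
  obtain ⟨m, hm⟩ : ∃ m, PySem.List.max? L (fun v => v) = some m := by
    rcases h : PySem.List.max? L (fun v => v) with _ | m
    · exact absurd ((PySem.List.max?_eq_none_iff _ _).mp h) hne
    · exact ⟨m, rfl⟩
  rw [hm]
  have hmmem : m ∈ L := PySem.List.max?_mem hm
  have hmax : ∀ y ∈ L, y ≤ m := fun y hy => PySem.List.max?_isMax hm y hy
  have h1 := (hmem m).mp hmmem
  have h2 : maxsub num_list limit ≤ m :=
    hmax _ ((hmem _).mpr ⟨maxsub_mem _ _, maxsub_le _ _ hl⟩)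
  have h3 : m ≤ maxsub num_list limit := maxsub_ub _ _ _ h1.1 h1.2
  simp only [Option.getD_some]
  omega

-- ---------- A port: table evolution ----------

-- table after s completed outer iterations (the multi-row, non-aliasing case)
def tabAt (num_list : List Int) (limit : Int) (s : Nat) : List (List Int) :=
  (List.range num_list.length).map fun m =>
    if m < s then
      (List.range (limit + 1).toNat).map fun jn : Nat => maxsub (num_list.take (m + 1)) (jn : Int)
    else
      List.replicate (limit + 1).toNat 0

-- row s during the inner loop, entries below m already written
def midRow (num_list : List Int) (limit : Int) (s m : Nat) : List Int :=
  (List.range (limit + 1).toNat).map fun jn : Nat =>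
    if jn < m then maxsub (num_list.take (s + 1)) (jn : Int) else 0

def midTab (num_list : List Int) (limit : Int) (s m : Nat) : List (List Int) :=
  (List.range num_list.length).map fun q =>
    if q < s then
      (List.range (limit + 1).toNat).map fun jn : Nat => maxsub (num_list.take (q + 1)) (jn : Int)
    else if q = s then midRow num_list limit s m
    else List.replicate (limit + 1).toNat 0

theorem set_map_range {α : Type} (W m : Nat) (f : Nat → α) (v : α) (_hm : m < W) :
    ((List.range W).map f).set m v =
      (List.range W).map (fun j => if j = m then v else f j) := by
  apply List.ext_getElem
  · simp
  · intro i h1 h2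
    simp only [List.length_set, List.length_map, List.length_range] at h1
    rw [List.getElem_set]
    by_cases hi : m = i
    · subst hi; simp
    · rw [if_neg hi]
      simp only [List.getElem_map, List.getElem_range]
      rw [if_neg (fun h => hi h.symm)]

theorem pyGet?_map_range {α : Type} (W : Nat) (g : Nat → α) (j : Int) (h0 : 0 ≤ j)
    (h1 : j.toNat < W) :
    PySem.List.pyGet? ((List.range W).map g) j = some (g j.toNat) := by
  rw [PySem.List.pyGet?_of_nonneg _ h0]
  rw [List.getElem?_map, List.getElem?_range h1]
  rfl

theorem getD_map_range' {α : Type} (W : Nat) (g : Nat → α) (m : Nat) (d : α) (hm : m < W)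
    : ((List.range W).map g).getD m d = g m := by
  rw [List.getD_eq_getElem?_getD]
  rw [List.getElem?_map, List.getElem?_range hm]
  rfl

-- reading dp_table[s-1][j] during outer iteration s < n (n ≥ 2: no aliasing)
theorem read_prev (num_list : List Int) (limit : Int) (s m : Nat) (j : Int)
    (hn : 2 ≤ num_list.length) (hs : s < num_list.length) (h0 : 0 ≤ j) (h1 : j ≤ limit) :
    pvRead (midTab num_list limit s m) ((s : Int) - 1) j =
      some (maxsub (num_list.take s) j) := by
  have hW : j.toNat < (limit + 1).toNat := by omega
  unfold pvRead midTab
  rcases s with _ | k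
  · have hneg : ((0 : Nat) : Int) - 1 = -1 := by norm_num
    rw [hneg, PySem.List.pyGet?_neg_one]
    rw [List.getLast?_eq_getElem?]
    have hlen : ((List.range num_list.length).map (fun q =>
        if q < 0 then
          (List.range (limit + 1).toNat).map fun jn : Nat => maxsub (num_list.take (q + 1)) (jn : Int)
        else if q = 0 then midRow num_list limit 0 m
        else List.replicate (limit + 1).toNat 0)).length = num_list.length := by simp
    rw [hlen]
    have hidx : num_list.length - 1 < num_list.length := by omega
    rw [List.getElem?_map, List.getElem?_range hidx]
    simp only [Option.map_some, Option.bind_some]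
    have c1 : ¬ (num_list.length - 1 < 0) := by omega
    have c2 : ¬ (num_list.length - 1 = 0) := by omega
    rw [if_neg c1, if_neg c2]
    rw [PySem.List.pyGet?_of_nonneg _ h0]
    rw [List.getElem?_replicate]
    rw [if_pos hW]
    simp [maxsub_nil]
  · have hcast : ((k + 1 : Nat) : Int) - 1 = (k : Int) := by push_cast; ring
    rw [hcast]
    rw [pyGet?_map_range _ _ _ (by positivity) (by simpa using by omega : (k : Int).toNat < num_list.length)]
    simp only [Int.toNat_natCast, Option.bind_some]
    rw [if_pos (by omega : k < k + 1)]
    rw [pyGet?_map_range _ _ _ h0 hW]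
    congr 2
    omega

theorem midRow_set (num_list : List Int) (limit : Int) (s m : Nat)
    (hm : m < (limit + 1).toNat) :
    (midRow num_list limit s m).set m (maxsub (num_list.take (s + 1)) (m : Int)) =
      midRow num_list limit s (m + 1) := by
  unfold midRow
  rw [set_map_range _ _ _ _ hm]
  apply List.map_congr_left
  intro j _
  by_cases hj : j = m
  · subst hj; simp
  · rw [if_neg hj]
    by_cases hlt : j < m
    · rw [if_pos hlt, if_pos (by omega)]
    · rw [if_neg hlt, if_neg (by omega)]

theorem write_mid (num_list : List Int) (limit : Int) (s m : Nat)
    (hs : s < num_list.length) (hm : m < (limit + 1).toNat) :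
    pvWrite (midTab num_list limit s m) (s : Int) (m : Int)
        (maxsub (num_list.take (s + 1)) (m : Int)) =
      midTab num_list limit s (m + 1) := by
  unfold pvWrite midTab
  simp only [Int.toNat_natCast]
  rw [getD_map_range' _ _ _ _ hs]
  rw [if_neg (by omega : ¬ s < s), if_pos rfl]
  rw [midRow_set _ _ _ _ hm]
  rw [set_map_range _ _ _ _ hs]
  apply List.map_congr_left
  intro q _
  by_cases hq : q = s
  · subst hq; rw [if_pos rfl, if_neg (by omega : ¬ q < q), if_pos rfl]
  · rw [if_neg hq]
    by_cases h1 : q < s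
    · rw [if_pos h1, if_pos h1]
    · rw [if_neg h1, if_neg h1, if_neg hq, if_neg hq]

theorem take_succ_eq (num_list : List Int) (s : Nat) (hs : s < num_list.length) :
    num_list.take (s + 1) = num_list.take s ++ [num_list[s]] := by
  rw [List.take_add_one]
  congr
  rw [List.getElem?_eq_getElem hs]
  rfl

-- one inner-loop step in outer iteration s (n ≥ 2)
theorem step_mid (num_list : List Int) (limit : Int) (s m : Nat)
    (hn : 2 ≤ num_list.length) (hs : s < num_list.length) (hl : 0 ≤ limit)
    (hp : ∀ x ∈ num_list, 0 ≤ x) (hm : m < (limit + 1).toNat) :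
    pvStep num_list (s : Int) (some (midTab num_list limit s m)) (m : Int) =
      some (midTab num_list limit s (m + 1)) := by
  have hmle : (m : Int) ≤ limit := by omega
  have hx : 0 ≤ num_list[s] := hp _ (List.getElem_mem hs)
  have hpt : ∀ y ∈ num_list.take s, 0 ≤ y := fun y hy => hp y (List.mem_of_mem_take hy)
  have hrec := maxsub_recurrence (num_list.take s) num_list[s] (m : Int) hx hpt (by positivity)
  rw [← take_succ_eq num_list s hs] at hrec
  unfold pvStep
  simp only [Option.bind_some]
  rw [read_prev num_list limit s m (m : Int) hn hs (by positivity) hmle]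
  simp only [Option.bind_some]
  rw [PySem.List.pyGet?_of_nonneg _ (by positivity)]
  simp only [Int.toNat_natCast]
  rw [List.getElem?_eq_getElem hs]
  simp only [Option.bind_some]
  by_cases hc : num_list[s] > (m : Int)
  · rw [if_pos hc]
    rw [if_pos hc] at hrec
    rw [← hrec] at *
    rw [write_mid num_list limit s m hs hm]
  · rw [if_neg hc]
    rw [if_neg hc] at hrec
    rw [read_prev num_list limit s m ((m : Int) - num_list[s]) hn hs (by omega) (by omega)]
    simp only [Option.bind_some]
    rw [← hrec]
    rw [write_mid num_list limit s m hs hm]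

theorem midTab_zero (num_list : List Int) (limit : Int) (s : Nat) :
    midTab num_list limit s 0 = tabAt num_list limit s := by
  unfold midTab tabAt midRow
  apply List.map_congr_left
  intro q _
  by_cases h1 : q < s
  · rw [if_pos h1, if_pos h1]
  · rw [if_neg h1, if_neg h1]
    by_cases h2 : q = s
    · rw [if_pos h2]
      simp [List.map_const']
    · rw [if_neg h2]

theorem midTab_full (num_list : List Int) (limit : Int) (s : Nat) :
    midTab num_list limit s (limit + 1).toNat = tabAt num_list limit (s + 1) := by
  unfold midTab tabAt midRow
  apply List.map_congr_left
  intro q _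
  by_cases h1 : q < s
  · rw [if_pos h1, if_pos (by omega)]
  · rw [if_neg h1]
    by_cases h2 : q = s
    · rw [if_pos h2, if_pos (by omega)]
      subst h2
      apply List.map_congr_left
      intro j hj
      rw [if_pos (List.mem_range.mp hj)]
    · rw [if_neg h2, if_neg (by omega)]

theorem inner_fold (num_list : List Int) (limit : Int) (s : Nat)
    (hn : 2 ≤ num_list.length) (hs : s < num_list.length) (hl : 0 ≤ limit)
    (hp : ∀ x ∈ num_list, 0 ≤ x) :
    ∀ m, m ≤ (limit + 1).toNat →
      (PySem.List.pyRange 0 (m : Int) 1).foldl (pvStep num_list (s : Int))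
          (some (midTab num_list limit s 0)) =
        some (midTab num_list limit s m) := by
  intro m
  induction m with
  | zero => intro _; rw [PySem.List.pyRange_one_eq_nil (by norm_num)]; rfl
  | succ k ih =>
    intro hk
    have hcast : ((k + 1 : Nat) : Int) = (k : Int) + 1 := by push_cast; ring
    rw [hcast, PySem.List.pyRange_one_succ_right (by positivity)]
    rw [List.foldl_append]
    rw [ih (by omega)]
    simp only [List.foldl_cons, List.foldl_nil]
    exact step_mid num_list limit s k hn hs hl hp (by omega)

theorem outer_fold (num_list : List Int) (limit : Int)
    (hn : 2 ≤ num_list.length) (hl : 0 ≤ limit) (hp : ∀ x ∈ num_list, 0 ≤ x) :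
    ∀ s, s ≤ num_list.length →
      (PySem.List.pyRange 0 (s : Int) 1).foldl
          (fun tb? i => (PySem.List.pyRange 0 (limit + 1) 1).foldl (pvStep num_list i) tb?)
          (some (tabAt num_list limit 0)) =
        some (tabAt num_list limit s) := by
  intro s
  induction s with
  | zero =>
    intro _
    rw [Nat.cast_zero, show PySem.List.pyRange 0 0 1 = [] from
      PySem.List.pyRange_one_eq_nil (by norm_num)]
    rfl
  | succ k ih =>
    intro hk
    have hcast : ((k + 1 : Nat) : Int) = (k : Int) + 1 := by push_cast; ring
    rw [hcast, show PySem.List.pyRange 0 ((k : Int) + 1) 1 =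
        PySem.List.pyRange 0 (k : Int) 1 ++ [(k : Int)] from
      PySem.List.pyRange_one_succ_right (by positivity)]
    rw [List.foldl_append]
    rw [ih (by omega)]
    simp only [List.foldl_cons, List.foldl_nil]
    have hW : (limit + 1 : Int) = (((limit + 1).toNat : Nat) : Int) := by omega
    rw [hW, ← midTab_zero]
    rw [inner_fold num_list limit k hn (by omega) hl hp _ (le_refl _)]
    rw [midTab_full]

theorem tabAt_zero (num_list : List Int) (limit : Int) :
    tabAt num_list limit 0 =
      List.replicate num_list.length (List.replicate (limit + 1).toNat 0) := by
  unfold tabAt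
  simp [List.map_const']

theorem A_eq_maxsub (num_list : List Int) (limit : Int)
    (hn : 2 ≤ num_list.length) (hl : 0 ≤ limit) (hp : ∀ x ∈ num_list, 0 ≤ x) :
    find_max_dp num_list limit = maxsub num_list limit := by
  unfold find_max_dp
  simp only [PySem.List.len_eq]
  rw [← tabAt_zero num_list limit]
  rw [outer_fold num_list limit hn hl hp num_list.length (le_refl _)]
  simp only [Option.bind_some]
  have hcast : (num_list.length : Int) - 1 = ((num_list.length - 1 : Nat) : Int) := by omega
  unfold pvRead tabAt
  rw [hcast]
  rw [pyGet?_map_range _ _ _ (by positivity) (by simpa using by omega)]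
  simp only [Int.toNat_natCast, Option.bind_some]
  rw [if_pos (by omega : num_list.length - 1 < num_list.length)]
  rw [pyGet?_map_range _ _ _ hl (by omega)]
  have : num_list.length - 1 + 1 = num_list.length := by omega
  rw [this, List.take_length]
  simp only [Option.getD_some]
  congr 1
  omega

-- ---------- A port, single-item list: the row aliases itself ----------

def oneRow (x limit : Int) (m : Nat) : List Int :=
  (List.range (limit + 1).toNat).map fun jn : Nat => if jn < m then unb x (jn : Int) else 0

theorem step_one (x limit : Int) (m : Nat) (hx : 0 ≤ x) (hl : 0 ≤ limit)
    (hm : m < (limit + 1).toNat) :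
    pvStep [x] 0 (some [oneRow x limit m]) (m : Int) = some [oneRow x limit (m + 1)] := by
  have hmle : (m : Int) ≤ limit := by omega
  unfold pvStep pvRead
  simp only [Option.bind_some]
  have hneg : (0 : Int) - 1 = -1 := by norm_num
  rw [hneg, PySem.List.pyGet?_neg_one]
  have hlast : ([oneRow x limit m]).getLast? = some (oneRow x limit m) := rfl
  rw [hlast]
  simp only [Option.bind_some]
  have hself : PySem.List.pyGet? (oneRow x limit m) (m : Int) = some 0 := by
    unfold oneRow
    rw [pyGet?_map_range _ _ _ (by positivity) (by simpa using hm)]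
    simp
  rw [hself]
  simp only [Option.bind_some, PySem.List.pyGet?_zero_cons]
  have hwrite : ∀ v, pvWrite [oneRow x limit m] 0 (m : Int) v =
      [(oneRow x limit m).set m v] := by
    intro v
    unfold pvWrite
    simp
  have hrowset : (oneRow x limit m).set m (unb x (m : Int)) = oneRow x limit (m + 1) := by
    unfold oneRow
    rw [set_map_range _ _ _ _ hm]
    apply List.map_congr_left
    intro j _
    by_cases hj : j = m
    · subst hj; simp
    · rw [if_neg hj]
      by_cases hlt : j < m
      · rw [if_pos hlt, if_pos (by omega)]
      · rw [if_neg hlt, if_neg (by omega)]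
  by_cases hc : x > (m : Int)
  · rw [if_pos hc, hwrite]
    have : unb x (m : Int) = 0 := by rw [unb]; rw [dif_neg (by omega)]
    rw [← this, hrowset]
  · rw [if_neg hc]
    by_cases hx0 : 0 < x
    · have hprev : PySem.List.pyGet? (oneRow x limit m) ((m : Int) - x) =
          some (unb x ((m : Int) - x)) := by
        unfold oneRow
        rw [pyGet?_map_range _ _ _ (by omega) (by omega)]
        rw [if_pos (by omega)]
        have hcast2 : (((m : Int) - x).toNat : Int) = (m : Int) - x :=
          Int.toNat_of_nonneg (by omega)
        rw [hcast2]
      rw [hprev]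
      simp only [Option.bind_some]
      rw [hwrite]
      have hv : max (unb x ((m : Int) - x) + x) 0 = unb x (m : Int) := by
        have h1 := unb_nonneg x ((m : Int) - x)
        conv_rhs => rw [unb]
        rw [dif_pos (by omega : 0 < x ∧ x ≤ (m : Int))]
        omega
      rw [hv, hrowset]
    · have hxz : x = 0 := by omega
      subst hxz
      have hprev : PySem.List.pyGet? (oneRow 0 limit m) ((m : Int) - 0) = some 0 := by
        unfold oneRow
        rw [pyGet?_map_range _ _ _ (by omega) (by omega)]
        rw [if_neg (by omega)]
      rw [hprev]
      simp only [Option.bind_some]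
      rw [hwrite]
      have hv : max (0 + 0 : Int) 0 = unb 0 (m : Int) := by
        conv_rhs => rw [unb]
        rw [dif_neg (by omega)]
        norm_num
      rw [hv, hrowset]

theorem inner_fold_one (x limit : Int) (hx : 0 ≤ x) (hl : 0 ≤ limit) :
    ∀ m, m ≤ (limit + 1).toNat →
      (PySem.List.pyRange 0 (m : Int) 1).foldl (pvStep [x] 0) (some [oneRow x limit 0]) =
        some [oneRow x limit m] := by
  intro m
  induction m with
  | zero => intro _; rw [PySem.List.pyRange_one_eq_nil (by norm_num)]; rfl
  | succ k ih =>
    intro hk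
    have hcast : ((k + 1 : Nat) : Int) = (k : Int) + 1 := by push_cast; ring
    rw [hcast, PySem.List.pyRange_one_succ_right (by positivity)]
    rw [List.foldl_append, ih (by omega)]
    simp only [List.foldl_cons, List.foldl_nil]
    exact step_one x limit k hx hl (by omega)

theorem A_single (x limit : Int) (hx : 0 ≤ x) (hl : 0 ≤ limit) :
    find_max_dp [x] limit = unb x limit := by
  unfold find_max_dp
  simp only [PySem.List.len_eq, List.length_cons, List.length_nil]
  have h1 : ((0 + 1 : Nat) : Int) = 1 := by norm_num
  have hrange : PySem.List.pyRange 0 ((0 + 1 : Nat) : Int) 1 = [0] := by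
    rw [h1]
    have := PySem.List.pyRange_one_singleton (0 : Int)
    simpa using this
  rw [hrange]
  simp only [List.foldl_cons, List.foldl_nil]
  have h0 : List.replicate (0 + 1) (List.replicate (limit + 1).toNat (0 : Int)) =
      [oneRow x limit 0] := by
    unfold oneRow
    simp [List.map_const']
  rw [h0]
  have hW : (limit + 1 : Int) = (((limit + 1).toNat : Nat) : Int) := by omega
  rw [hW, inner_fold_one x limit hx hl _ (le_refl _)]
  simp only [Option.bind_some]
  unfold pvRead
  have h2 : ((0 + 1 : Nat) : Int) - 1 = 0 := by norm_num
  rw [h2, PySem.List.pyGet?_zero_cons]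
  simp only [Option.bind_some]
  unfold oneRow
  rw [pyGet?_map_range _ _ _ hl (by omega)]
  rw [if_pos (by omega)]
  simp only [Option.getD_some]
  congr 1
  omega

-- ===== VERDICT (by name: the statement is the Claim_ definition above) =====
theorem find_max_dp_spec : Claim_unchanged_find_max_dp := by
  unfold Claim_unchanged_find_max_dp
  intro num_list limit _ hpre hnd
  obtain ⟨hne, hl, hp⟩ := hpre
  rw [alt_eq_maxsub num_list limit hl hp]
  match num_list, hne with
  | [x], _ =>
    have hx : 0 ≤ x := hp x (by simp)
    rw [A_single x limit hx hl]
    rw [maxsub_single x limit hx hl]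
    by_cases hc : x > limit
    · rw [if_pos hc, unb, dif_neg (by omega)]
    · rw [if_neg hc]
      by_cases hx0 : 0 < x
      · have hnd2 : ¬ (2 * x ≤ limit) := by
          intro h
          apply hnd
          unfold D_find_max_dp
          exact ⟨by simp, by simpa using hx0, by simpa using h⟩
        rw [unb, dif_pos (by omega : 0 < x ∧ x ≤ limit)]
        rw [unb, dif_neg (by omega)]
        omega
      · have hxz : x = 0 := by omega
        subst hxz
        rw [unb, dif_neg (by omega)]
  | x :: y :: t, _ =>
    exact A_eq_maxsub _ limit (by simp) hl hp

theorem find_max_dp_changed : Claim_changed_find_max_dp := by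
  unfold Claim_changed_find_max_dp; decide

theorem find_max_dp_tight : Claim_exact_find_max_dp := by
  unfold Claim_exact_find_max_dp
  intro num_list limit _ hpre hd
  obtain ⟨hne, hl, hp⟩ := hpre
  obtain ⟨hlen, hx0, hxl⟩ := hd
  match num_list, hlen with
  | [x], _ =>
    simp only [List.headI] at hx0 hxl
    have hx : 0 ≤ x := hp x (by simp)
    rw [A_single x limit hx hl, alt_eq_maxsub _ limit hl hp, maxsub_single x limit hx hl]
    rw [if_neg (by omega)]
    rw [unb, dif_pos (by omega : 0 < x ∧ x ≤ limit)]
    rw [unb, dif_pos (by omega : 0 < x ∧ x ≤ limit - x)]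
    have := unb_nonneg x (limit - x - x)
    omega
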